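-- pv_equiv track=rewrite | github.com/rkweku/miRador | miRador.py | findSequenceInIR
-- ===== SOURCE A (Python) =====
-- def findSequenceInIR(sequence, IRArm, tagLength):
--     """
--     If a sequence cannot be found in a simple search in an inverted repeat
--     arm, it is because there are gaps that interrupt the sequence. Thus, we
--     must do some work to find the tag, WITH gaps, as wel as the start and
--     end positions of the tag with gaps to identify potential duplexes
--
--     Args:
--         sequence: Small RNA to be idenfitied in the inverted repeat
--         IRArm: The aligning arm of the inverted repeat with gaps as hyphens
--         tagLength: The length of the sequence
--
--     Returns:
--         A tuple of the sequence with gaps, its start position, and its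
--         end position on the inverted repeat arm
--
--     """
--
--     # Get the start position of the sequence on the IR arm without any
--     # gap sequences
--     localStart = IRArm.replace('-','').find(sequence)
--
--     # Initialize offset and sequence gap count to 0
--     offset = 0
--     gapCount = 0
--
--     # Initialize offset update flag to True
--     offsetUpdate = True
--
--     # Loop through until no update is made to the offset through
--     # successive iterations
--     while(offsetUpdate):
--         # Store the previous offset value for update determination
--         oldOffset = offset
--
--         # Set the offset to the number of gaps prior to the 5' start
--         # position + the current offset (important because if
--         # is a gap after the previously found offset)
--         offset = IRArm[:localStart + \
--             offset].count('-')
--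
--         # If the new offset is the same as the
--         # old (number of gaps), set the
--         # offsetUpdate flag to False to break
--         if(offset == oldOffset):
--             offsetUpdate = False
--
--     # Initialize non gap base counts
--     baseCount = 0
--
--     # Initialize a variable to hold the sequence with gaps
--     sequenceWithGaps = ''
--
--     # Initialize a counter to 0 so that we can
--     # fill the new sequence variables one by one
--     counter = 0
--
--     # Loop through the arm of the IR to fill
--     # sequence5 with its sequence, including
--     # gaps
--     while(baseCount < tagLength):
--         # Store the current base as the current
--         # nucleotide at this calculated position
--         base = IRArm[localStart + offset + counter]
--
--         # Add the base to the new sequence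
--         sequenceWithGaps += base
--
--         # If the base is not a gap, increment the
--         # baseCount variable to ensure we only
--         # record as many bases to replicate the
--         # mapped sRNA
--         if(base != '-'):
--             baseCount += 1
--
--         else:
--             gapCount += 1
--
--         # Increment the counter to ensure we
--         # progress through the arm
--         counter += 1
--
--     localStart += offset
--     localEnd = localStart + tagLength + gapCount - 1
--
--     return(sequenceWithGaps, localStart, localEnd)
-- ===== SOURCE B (Python) =====
-- def findSequenceInIR(sequence, IRArm, tagLength):
--     """Re-implementation: index the non-gap positions once and map the ungapped
--     start/end straight to gapped coordinates; find's -1 sentinel is kept as the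
--     start, and a non-positive tagLength yields the empty tag."""
--     ungapped = IRArm.replace('-', '')
--     localStart = ungapped.find(sequence)
--     pos = [i for i, c in enumerate(IRArm) if c != '-']
--     start = pos[localStart - 1] + 1 if localStart >= 1 else localStart
--     if tagLength <= 0:
--         return ('', start, start + tagLength - 1)
--     end = pos[localStart + tagLength - 1]
--     return (IRArm[start:end + 1], start, end)
-- ===== Notes on version B (the rewrite author's own statement) =====
-- stated objective: alternative
-- what changed: Replaces A's repeated-prefix-count fixpoint loop and character-by-character gather loop with one pass that records the non-gap positions and maps the ungapped start and end directly to gapped coordinates, slicing the arm once (find's -1 sentinel is kept as the start, and a non-positive tagLength yields the empty tag).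
-- outside the precondition, e.g. on findSequenceInIR('G', 'ACA', 1): A returns ('A', -1, -1), B returns ('A', -1, 2)
import Mathlib
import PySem

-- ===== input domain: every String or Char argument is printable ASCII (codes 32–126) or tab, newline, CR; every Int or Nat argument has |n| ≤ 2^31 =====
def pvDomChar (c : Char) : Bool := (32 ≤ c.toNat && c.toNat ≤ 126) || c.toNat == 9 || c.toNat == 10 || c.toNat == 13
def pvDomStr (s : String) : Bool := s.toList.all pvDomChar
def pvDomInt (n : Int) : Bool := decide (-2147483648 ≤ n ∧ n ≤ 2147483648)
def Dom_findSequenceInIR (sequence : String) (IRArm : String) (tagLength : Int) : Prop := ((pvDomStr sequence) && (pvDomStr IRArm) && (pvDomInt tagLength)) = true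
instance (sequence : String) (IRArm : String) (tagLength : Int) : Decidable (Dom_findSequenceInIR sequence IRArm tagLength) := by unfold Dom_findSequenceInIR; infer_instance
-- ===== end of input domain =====

-- B replaces A's repeated-prefix-count fixpoint loop and char-by-char gather loop by one
-- pass recording the non-gap positions and mapping the ungapped start/end straight to
-- gapped coordinates (objective: alternative algorithm; no speed is claimed).

-- ===== PORT A =====
-- A's offset fixpoint while-loop; the fuel argument only makes the while-loop total
-- (inside Pre_ it is never exhausted: the offset strictly grows each kept iteration)
def aOffsetLoop (arm : List Char) (localStart : Int) : Nat → Int → Int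
  | 0, offset => offset
  | fuel+1, offset =>
      let newOffset : Int :=
        (PySem.Chars.count (PySem.Chars.slice arm none (some (localStart + offset))) ['-'] : Int)
      if newOffset = offset then newOffset
      else aOffsetLoop arm localStart fuel newOffset

-- A's gather while-loop (baseCount, gapCount, counter, sequenceWithGaps); fuel as above;
-- the `none` branch is exactly where Python raises IndexError (outside Pre_)
def aGatherLoop (arm : List Char) (tagLength startIdx : Int) :
    Nat → Int → Int → Int → List Char → List Char × Int
  | 0, _, gapCount, _, acc => (acc, gapCount)
  | fuel+1, baseCount, gapCount, counter, acc =>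
      if baseCount < tagLength then
        match PySem.List.pyGet? arm (startIdx + counter) with
        | none => (acc, gapCount)
        | some base =>
          if base != '-' then
            aGatherLoop arm tagLength startIdx fuel (baseCount+1) gapCount (counter+1) (acc ++ [base])
          else
            aGatherLoop arm tagLength startIdx fuel baseCount (gapCount+1) (counter+1) (acc ++ [base])
      else (acc, gapCount)

def findSequenceInIR (sequence : String) (IRArm : String) (tagLength : Int) : String × Int × Int :=
  let arm := IRArm.toList
  let localStart := PySem.Chars.find (PySem.Chars.replace arm ['-'] []) sequence.toList
  let offset := aOffsetLoop arm localStart (arm.length + 1) 0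
  let p := aGatherLoop arm tagLength (localStart + offset) (arm.length + 1) 0 0 0 []
  let localStart2 := localStart + offset
  let localEnd := localStart2 + tagLength + p.2 - 1
  (String.ofList p.1, localStart2, localEnd)

-- ===== PORT B =====
-- transliteration of Source B: non-gap positions via enumerate/filter, direct coordinate
-- lookups; find's -1 sentinel kept as start, empty tag for non-positive tagLength.
-- pos[...] out of range is Python IndexError = pyGet? none, excluded by Pre_.
def findSequenceInIR_alt (sequence : String) (IRArm : String) (tagLength : Int) : String × Int × Int :=
  let arm := IRArm.toList
  let ungapped := PySem.Chars.replace arm ['-'] []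
  let localStart := PySem.Chars.find ungapped sequence.toList
  let pos := ((PySem.List.enumerate arm).filter (fun ic => ic.2 != '-')).map Prod.fst
  let start : Int :=
    if 1 ≤ localStart then (PySem.List.pyGet? pos (localStart - 1)).getD 0 + 1 else localStart
  if tagLength ≤ 0 then ("", start, start + tagLength - 1)
  else
    let e : Int := (PySem.List.pyGet? pos (localStart + tagLength - 1)).getD 0
    (String.ofList (PySem.List.slice arm (some start) (some (e + 1))), start, e)

-- ===== PRECONDITION & SPEC =====
-- Pre_ admits the inputs on which A's value is the function's own: a sequence found in
-- the ungapped arm with 1 ≤ tagLength fitting its non-gap bases (the normal case), and the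
-- degenerate non-positive tagLength requests A answers with an empty tag.  It excludes:
-- tags overrunning the arm's non-gap bases (A raises IndexError, so does B); absent
-- sequences with a gap in the arm before its last character (A's offset loop never
-- terminates); and absent sequences with 1 ≤ tagLength, where A's returned tag is the arm
-- read from its last character onwards — an artefact of negative-index wraparound — while
-- B reads from a defined coordinate (see cites).
def Pre_findSequenceInIR (sequence : String) (IRArm : String) (tagLength : Int) : Prop :=
  (0 ≤ PySem.Chars.find (PySem.Chars.replace IRArm.toList ['-'] []) sequence.toList ∧
    1 ≤ tagLength ∧
    PySem.Chars.find (PySem.Chars.replace IRArm.toList ['-'] []) sequence.toList + tagLength ≤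
      (PySem.Chars.replace IRArm.toList ['-'] []).length) ∨
  (tagLength ≤ 0 ∧
    (0 ≤ PySem.Chars.find (PySem.Chars.replace IRArm.toList ['-'] []) sequence.toList ∨
      (IRArm.toList.dropLast).count '-' = 0))

instance (sequence : String) (IRArm : String) (tagLength : Int) : Decidable (Pre_findSequenceInIR sequence IRArm tagLength) := by
  unfold Pre_findSequenceInIR; infer_instance

def pvWitness_findSequenceInIR : String × String × Int := ("CA", "C-A", 2)

def Spec_findSequenceInIR (sequence : String) (IRArm : String) (tagLength : Int) (out : String × Int × Int) : Prop := out = findSequenceInIR_alt sequence IRArm tagLength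
instance (sequence : String) (IRArm : String) (tagLength : Int) (out : String × Int × Int) : Decidable (Spec_findSequenceInIR sequence IRArm tagLength out) := by unfold Spec_findSequenceInIR; infer_instance

-- ===== CLAIM (what is proved, stated in full; the proofs are below) =====
def Claim_equal_findSequenceInIR : Prop := ∀ (sequence : String) (IRArm : String) (tagLength : Int), Dom_findSequenceInIR sequence IRArm tagLength → Pre_findSequenceInIR sequence IRArm tagLength → Spec_findSequenceInIR sequence IRArm tagLength (findSequenceInIR sequence IRArm tagLength)

-- ===== LEMMAS AND PROOFS =====

-- `pvScan l k` = number of characters of l consumed to pass k non-gap characters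
-- (gaps directly before the k-th non-gap included) = the least n with k non-gaps in l.take n.
def pvScan : List Char → Nat → Nat
  | _, 0 => 0
  | [], _+1 => 0
  | c :: t, k+1 => if c = '-' then pvScan t (k+1) + 1 else pvScan t k + 1

theorem pvScan_zero (l : List Char) : pvScan l 0 = 0 := by cases l <;> rfl


theorem pv_prefixOf_single_false {c x : Char} (t : List Char) (hx : ¬ x = c) :
    ([c].isPrefixOf (x :: t)) = false := by
  simp [List.isPrefixOf]
  intro hcx; exact absurd hcx.symm hx

theorem pv_replace_go (c : Char) :
    ∀ (fuel : Nat) (l acc : List Char), l.length ≤ fuel →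
      PySem.Chars.replace.go [c] [] fuel l acc = acc.reverse ++ l.filter (fun x => x != c) := by
  intro fuel
  induction fuel with
  | zero => intro l acc h; rw [List.length_eq_zero_iff.mp (Nat.le_zero.mp h)]; simp [PySem.Chars.replace.go]
  | succ f ih =>
    intro l acc h
    cases l with
    | nil => simp [PySem.Chars.replace.go]
    | cons x t =>
      rw [PySem.Chars.replace.go]
      by_cases hx : x = c
      · subst hx
        simp only [List.isPrefixOf, BEq.rfl, Bool.true_and, if_true,
          List.length_cons, List.length_nil, List.drop_succ_cons, List.drop_zero,
          List.reverse_nil, List.nil_append]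
        rw [ih t acc (by simpa using Nat.le_of_succ_le_succ h)]
        simp
      · rw [pv_prefixOf_single_false t hx]
        simp only [Bool.false_eq_true, if_false]
        rw [ih t (x :: acc) (by simpa using Nat.le_of_succ_le_succ h)]
        simp [hx]

theorem pv_replace_filter (l : List Char) (c : Char) :
    PySem.Chars.replace l [c] [] = l.filter (fun x => x != c) := by
  rw [PySem.Chars.replace]
  simp only [List.isEmpty_cons, Bool.false_eq_true, if_false]
  simpa using pv_replace_go c l.length l []

theorem pv_count_go (c : Char) :
    ∀ (fuel : Nat) (l : List Char) (acc : Nat), l.length ≤ fuel →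
      PySem.Chars.count.go [c] fuel l acc = acc + l.count c := by
  intro fuel
  induction fuel with
  | zero => intro l acc h; rw [List.length_eq_zero_iff.mp (Nat.le_zero.mp h)]; simp [PySem.Chars.count.go]
  | succ f ih =>
    intro l acc h
    cases l with
    | nil => simp [PySem.Chars.count.go]
    | cons x t =>
      rw [PySem.Chars.count.go]
      by_cases hx : x = c
      · subst hx
        simp only [List.isPrefixOf, BEq.rfl, Bool.true_and, if_true,
          List.length_cons, List.length_nil, List.drop_succ_cons, List.drop_zero]
        rw [ih t (acc+1) (by simpa using Nat.le_of_succ_le_succ h)]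
        simp [List.count_cons]
        omega
      · rw [pv_prefixOf_single_false t hx]
        simp only [Bool.false_eq_true, if_false]
        rw [ih t acc (by simpa using Nat.le_of_succ_le_succ h)]
        simp [List.count_cons, hx]

theorem pv_count_single (l : List Char) (c : Char) :
    PySem.Chars.count l [c] = l.count c := by
  rw [PySem.Chars.count]
  simp only [List.isEmpty_cons, Bool.false_eq_true, if_false]
  simpa using pv_count_go c l.length l 0

theorem pv_filter_len (l : List Char) :
    (l.filter (fun x => x != '-')).length + l.count '-' = l.length := by
  induction l with
  | nil => simp
  | cons x t ih =>
    by_cases hx : x = '-' <;> simp [List.count_cons, hx] <;> omega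

theorem pvScan_spec (l : List Char) (k : Nat) (h : k + l.count '-' ≤ l.length) :
    pvScan l k ≤ l.length ∧ k ≤ pvScan l k ∧
      (l.take (pvScan l k)).count '-' + k = pvScan l k := by
  induction l generalizing k with
  | nil => simp at h; simp [h, pvScan]
  | cons x t ih =>
    cases k with
    | zero => simp [pvScan_zero]
    | succ k' =>
      by_cases hx : x = '-'
      · subst hx
        simp only [List.count_cons, List.length_cons, BEq.rfl, if_true] at h
        have ih' := ih (k'+1) (by omega)
        simp only [pvScan, if_true, List.take_succ_cons, List.count_cons, BEq.rfl]
        constructor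
        · simpa using ih'.1
        constructor
        · omega
        · have := ih'.2.2; omega
      · have hbx : ¬ (x == '-') = true := by simpa using hx
        simp only [List.count_cons, List.length_cons, hbx, if_false] at h
        have ih' := ih k' (by omega)
        simp only [pvScan, hx, if_false, List.take_succ_cons, List.count_cons, hbx]
        constructor
        · simpa using ih'.1
        constructor
        · omega
        · have := ih'.2.2; simp [hbx]; omega
  
theorem pvScan_min (l : List Char) (k n : Nat)
    (h : k + (l.take n).count '-' ≤ (l.take n).length) : pvScan l k ≤ n := by
  induction l generalizing k n with
  | nil => cases k with
    | zero => simp [pvScan_zero]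
    | succ k' => simp at h
  | cons x t ih =>
    cases k with
    | zero => simp [pvScan_zero]
    | succ k' =>
      cases n with
      | zero => simp at h
      | succ n' =>
        by_cases hx : x = '-'
        · subst hx
          simp only [List.take_succ_cons, List.count_cons, BEq.rfl, if_true, List.length_cons] at h
          simp only [pvScan, if_true]
          have := ih (k'+1) n' (by omega)
          omega
        · have hbx : ¬ (x == '-') = true := by simpa using hx
          simp only [List.take_succ_cons, List.count_cons, hbx, if_false, List.length_cons] at h
          simp only [pvScan, hx, if_false]
          have := ih k' n' (by omega)
          omega

theorem pvScan_add (l : List Char) (k t : Nat) (h : (k + t) + l.count '-' ≤ l.length) :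
    pvScan l (k + t) = pvScan l k + pvScan (l.drop (pvScan l k)) t := by
  induction l generalizing k with
  | nil =>
    simp at h
    simp [h.1, h.2, pvScan_zero, pvScan]
  | cons x u ih =>
    cases k with
    | zero => simp [pvScan_zero]
    | succ k' =>
      have e1 : k' + 1 + t = (k' + t) + 1 := by omega
      rw [e1]
      by_cases hx : x = '-'
      · subst hx
        simp only [List.count_cons, List.length_cons, BEq.rfl, if_true] at h
        simp only [pvScan, if_true, List.drop_succ_cons]
        rw [← e1, ih (k'+1) (by omega)]
        omega
      · have hbx : ¬ (x == '-') = true := by simpa using hx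
        simp only [List.count_cons, List.length_cons, hbx, if_false] at h
        simp only [pvScan, hx, if_false, List.drop_succ_cons]
        rw [ih k' (by omega)]
        omega

theorem pv_count_take_mono (l : List Char) (c : Char) {m n : Nat} (h : m ≤ n) :
    (l.take m).count c ≤ (l.take n).count c := by
  have h1 : l.take m = (l.take n).take m := by
    rw [List.take_take]; rw [Nat.min_eq_left h]
  rw [h1]
  exact ((l.take n).take_sublist m).count_le c

-- B's position list, indexed
theorem pv_pos_get (l : List Char) (s : Int) (k : Nat)
    (h : (k + 1) + l.count '-' ≤ l.length) :
    (((PySem.List.enumerate l s).filter (fun ic => ic.2 != '-')).map Prod.fst)[k]? =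
      some (s + (pvScan l (k + 1) : Int) - 1) := by
  induction l generalizing s k with
  | nil => simp at h
  | cons x t ih =>
    rw [PySem.List.enumerate_cons]
    by_cases hx : x = '-'
    · subst hx
      simp only [List.count_cons, List.length_cons, BEq.rfl, if_true] at h
      simp only [List.filter_cons, bne_self_eq_false, Bool.false_eq_true, if_false]
      rw [ih (s+1) k (by omega)]
      simp only [pvScan, if_true]
      congr 1
      push_cast
      ring
    · have hbx : (x != '-') = true := by simpa using hx
      simp only [List.count_cons, List.length_cons, (by simpa using hx : ¬ (x == '-') = true), if_false] at h
      simp only [List.filter_cons, hbx, if_true, List.map_cons]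
      cases k with
      | zero =>
        simp only [List.getElem?_cons_zero]
        simp [pvScan, hx, pvScan_zero]
      | succ k' =>
        simp only [List.getElem?_cons_succ]
        rw [ih (s+1) k' (by omega)]
        simp only [pvScan, hx, if_false]
        congr 1
        push_cast
        ring

-- A's fixpoint loop converges to the least fixpoint, i.e. to pvScan l n - n
theorem pv_offset_loop (arm : List Char) (n : Nat) (hn : n + arm.count '-' ≤ arm.length) :
    ∀ (fuel o : Nat), o ≤ pvScan arm n - n → o ≤ (arm.take (n + o)).count '-' →
      pvScan arm n - n ≤ o + fuel →
      aOffsetLoop arm (n : Int) fuel (o : Int) = ((pvScan arm n - n : Nat) : Int) := by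
  have hS := pvScan_spec arm n hn
  intro fuel
  induction fuel with
  | zero =>
    intro o h1 _ h3
    have : o = pvScan arm n - n := by omega
    simp [aOffsetLoop, this]
  | succ f ih =>
    intro o h1 h2 h3
    rw [aOffsetLoop]
    have hcast : (n : Int) + (o : Int) = ((n + o : Nat) : Int) := by push_cast; ring
    simp only [PySem.Chars.slice_eq_listSlice]
    rw [hcast, PySem.List.slice_to_natCast, pv_count_single]
    set m := (arm.take (n + o)).count '-' with hm
    by_cases he : (m : Int) = (o : Int)
    · have heo : m = o := by exact_mod_cast he
      rw [if_pos he]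
      -- show o is the fixpoint: pvScan arm n ≤ n + o
      have hlen : n + o ≤ arm.length := by
        by_cases hl : arm.length ≤ n + o
        · rw [List.take_of_length_le hl] at hm
          omega
        · omega
      have hmin : pvScan arm n ≤ n + o := by
        apply pvScan_min arm n (n + o)
        rw [← hm, heo, List.length_take, Nat.min_eq_left hlen]
      have : o = pvScan arm n - n := by omega
      rw [he, this]
    · rw [if_neg he]
      have hne : m ≠ o := fun hh => he (by exact_mod_cast hh)
      have hlt : o < m := by omega
      have hmle : m ≤ pvScan arm n - n := by
        have h4 : n + o ≤ pvScan arm n := by omega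
        have := pv_count_take_mono arm '-' h4
        omega
      have hminv : m ≤ (arm.take (n + m)).count '-' := by
        have := pv_count_take_mono arm '-' (show n + o ≤ n + m by omega)
        omega
      exact ih m hmle hminv (by omega)

-- A's gather loop collects exactly the next pvScan u t characters of the arm
theorem pv_gather_loop (arm : List Char) (tagLength : Int) (s : Nat) :
    ∀ (u : List Char) (cnt t : Nat) (bc gc : Int) (acc : List Char) (fuel : Nat),
      arm.drop (s + cnt) = u → t + u.count '-' ≤ u.length → bc + (t : Int) = tagLength →
      u.length ≤ fuel →
      aGatherLoop arm tagLength (s : Int) fuel bc gc (cnt : Int) acc =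
        (acc ++ u.take (pvScan u t), gc + ((u.take (pvScan u t)).count '-' : Int)) := by
  intro u
  induction u with
  | nil =>
    intro cnt t bc gc acc fuel _ h2 hbc _
    have ht : t = 0 := by simpa using h2
    subst ht
    have hbc' : bc = tagLength := by simpa using hbc
    cases fuel with
    | zero => simp [aGatherLoop]
    | succ f => rw [aGatherLoop, if_neg (by omega : ¬ bc < tagLength)]; simp
  | cons x u' ih =>
    intro cnt t bc gc acc fuel harm h2 hbc hfuel
    cases t with
    | zero =>
      have hbc' : bc = tagLength := by simpa using hbc
      cases fuel with
      | zero => simp [aGatherLoop, pvScan_zero]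
      | succ f =>
        rw [aGatherLoop, if_neg (by omega : ¬ bc < tagLength)]
        simp [pvScan_zero]
    | succ t' =>
      have hlt : bc < tagLength := by push_cast at hbc; omega
      cases fuel with
      | zero => simp at hfuel
      | succ f =>
        rw [aGatherLoop, if_pos hlt]
        have hget : arm[s + cnt]? = some x := by
          have h0 : (arm.drop (s + cnt))[0]? = some x := by rw [harm]; rfl
          rwa [List.getElem?_drop, Nat.add_zero] at h0
        have hcast : (s : Int) + (cnt : Int) = ((s + cnt : Nat) : Int) := by push_cast; ring
        rw [hcast, PySem.List.pyGet?_natCast, hget]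
        dsimp only
        have hdrop : arm.drop (s + (cnt + 1)) = u' := by
          have h1 : (arm.drop (s + cnt)).drop 1 = u' := by rw [harm]; rfl
          rw [List.drop_drop] at h1
          convert h1 using 2
        have hcnt1 : ((cnt : Int) + 1) = ((cnt + 1 : Nat) : Int) := by push_cast; ring
        by_cases hx : x = '-'
        · subst hx
          simp only [bne_self_eq_false, Bool.false_eq_true, if_false]
          rw [hcnt1, ih (cnt+1) (t'+1) bc (gc+1) (acc ++ ['-']) f hdrop
            (by simp [List.count_cons] at h2 ⊢; omega) hbc (by simpa using hfuel)]
          simp only [pvScan, if_true, List.take_succ_cons, List.count_cons, BEq.rfl, if_true,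
            Prod.mk.injEq]
          constructor
          · simp
          · push_cast; ring
        · have hbx : (x != '-') = true := by simpa using hx
          rw [if_pos (by simp [hbx])]
          have h2' : t' + u'.count '-' ≤ u'.length := by
            simp only [List.count_cons, List.length_cons,
              (by simpa using hx : ¬ (x == '-') = true), if_false] at h2
            omega
          rw [hcnt1, ih (cnt+1) t' (bc+1) gc (acc ++ [x]) f hdrop h2'
            (by push_cast at hbc ⊢; omega) (by simpa using hfuel)]
          simp only [pvScan, hx, if_false, List.take_succ_cons, List.count_cons,
            (by simpa using hx : ¬ (x == '-') = true), if_false, Prod.mk.injEq]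
          constructor
          · simp
          · rfl

-- B's start coordinate equals the least-fixpoint start, for a found sequence
theorem pv_found_start (arm : List Char) (n : Nat) (hcnt : n + arm.count '-' ≤ arm.length) :
    (if 1 ≤ (n : Int) then
        (PySem.List.pyGet? (((PySem.List.enumerate arm).filter (fun ic => ic.2 != '-')).map
          Prod.fst) ((n : Int) - 1)).getD 0 + 1
      else (n : Int)) = ((pvScan arm n : Nat) : Int) := by
  cases n with
  | zero => rw [if_neg (by omega)]; simp [pvScan_zero]
  | succ k =>
    rw [if_pos (by omega)]
    rw [show ((k + 1 : Nat) : Int) - 1 = ((k : Nat) : Int) from by omega]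
    rw [PySem.List.pyGet?_natCast, pv_pos_get arm 0 k (by omega)]
    simp only [Option.getD_some]
    omega

-- ===== VERDICT (by name: the statement is the Claim_ definition above) =====
theorem findSequenceInIR_spec : Claim_equal_findSequenceInIR := by
  intro seq IRArm tag _hdom hpre
  unfold Spec_findSequenceInIR
  unfold Pre_findSequenceInIR at hpre
  rw [findSequenceInIR, findSequenceInIR_alt]
  generalize IRArm.toList = arm at hpre ⊢
  have hstrip := pv_filter_len arm
  rcases hpre with ⟨h0, h1, h2⟩ | ⟨htle, hdisj⟩
  · -- found sequence, 1 ≤ tagLength fitting the non-gap bases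
    obtain ⟨n, hls⟩ : ∃ m : Nat,
        PySem.Chars.find (PySem.Chars.replace arm ['-'] []) seq.toList = (m : Int) :=
      ⟨_, (Int.toNat_of_nonneg h0).symm⟩
    obtain ⟨tN, htag⟩ : ∃ m : Nat, tag = (m : Int) := ⟨_, (Int.toNat_of_nonneg (by omega)).symm⟩
    have htN1 : 1 ≤ tN := by omega
    have hfact : n + tN + arm.count '-' ≤ arm.length := by
      rw [hls, htag, pv_replace_filter] at h2
      omega
    have hcnt : n + arm.count '-' ≤ arm.length := by omega
    obtain ⟨hsp1, hsp2, hsp3⟩ := pvScan_spec arm n hcnt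
    have hsplit : (arm.take (pvScan arm n)).count '-' + (arm.drop (pvScan arm n)).count '-'
        = arm.count '-' := by
      rw [← List.count_append, List.take_append_drop]
    have hulen : (arm.drop (pvScan arm n)).length = arm.length - pvScan arm n :=
      List.length_drop
    have hu2 : tN + (arm.drop (pvScan arm n)).count '-' ≤ (arm.drop (pvScan arm n)).length := by
      omega
    obtain ⟨hup1, hup2, hup3⟩ := pvScan_spec _ tN hu2
    have hoff : aOffsetLoop arm (n : Int) (arm.length + 1) 0 = ((pvScan arm n - n : Nat) : Int) := by
      simpa using pv_offset_loop arm n hcnt (arm.length + 1) 0 (Nat.zero_le _) (Nat.zero_le _)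
        (by omega)
    have hgather : aGatherLoop arm tag ((pvScan arm n : Nat) : Int) (arm.length + 1) 0 0 0 [] =
        ((arm.drop (pvScan arm n)).take (pvScan (arm.drop (pvScan arm n)) tN),
          (((arm.drop (pvScan arm n)).take (pvScan (arm.drop (pvScan arm n)) tN)).count '-' : Int)) := by
      simpa using pv_gather_loop arm tag (pvScan arm n) _ 0 tN 0 0 [] (arm.length + 1)
        (by rw [Nat.add_zero]) hu2 (by omega) (by omega)
    have hadd := pvScan_add arm n tN hfact
    simp only [hls, hoff]
    rw [if_neg (by omega : ¬ tag ≤ 0)]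
    rw [show (n : Int) + ((pvScan arm n - n : Nat) : Int) = ((pvScan arm n : Nat) : Int) from
      by omega, hgather]
    rw [pv_found_start arm n hcnt, htag]
    rw [show ((n : Int) + (tN : Int) - 1) = ((n + tN - 1 : Nat) : Int) from by omega]
    rw [PySem.List.pyGet?_natCast, pv_pos_get arm 0 (n + tN - 1) (by omega)]
    simp only [Option.getD_some]
    rw [show n + tN - 1 + 1 = n + tN from by omega]
    rw [show (0 : Int) + ((pvScan arm (n + tN) : Nat) : Int) - 1 + 1
        = ((pvScan arm (n + tN) : Nat) : Int) from by omega]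
    rw [PySem.List.slice_natCast, hadd]
    rw [show pvScan arm n + pvScan (arm.drop (pvScan arm n)) tN - pvScan arm n
        = pvScan (arm.drop (pvScan arm n)) tN from by omega]
    simp only [Prod.mk.injEq]
    refine ⟨trivial, trivial, by omega⟩
  · -- non-positive tagLength: A's gather loop never runs, the tag is empty
    have hg0 : ∀ st : Int, aGatherLoop arm tag st (arm.length + 1) 0 0 0 [] = ([], 0) := by
      intro st
      rw [aGatherLoop]
      rw [if_neg (by omega : ¬ (0 : Int) < tag)]
    by_cases h0 : 0 ≤ PySem.Chars.find (PySem.Chars.replace arm ['-'] []) seq.toList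
    · -- the sequence is still found: the start coordinate is the least-fixpoint start
      obtain ⟨n, hls⟩ : ∃ m : Nat,
          PySem.Chars.find (PySem.Chars.replace arm ['-'] []) seq.toList = (m : Int) :=
        ⟨_, (Int.toNat_of_nonneg h0).symm⟩
      have hfle := PySem.Chars.find_le_length (PySem.Chars.replace arm ['-'] []) seq.toList
      have hcnt : n + arm.count '-' ≤ arm.length := by
        rw [hls, pv_replace_filter] at hfle
        omega
      obtain ⟨hsp1, hsp2, hsp3⟩ := pvScan_spec arm n hcnt
      have hoff : aOffsetLoop arm (n : Int) (arm.length + 1) 0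
          = ((pvScan arm n - n : Nat) : Int) := by
        simpa using pv_offset_loop arm n hcnt (arm.length + 1) 0 (Nat.zero_le _) (Nat.zero_le _)
          (by omega)
      simp only [hls, hoff]
      rw [if_pos htle, hg0]
      rw [pv_found_start arm n hcnt]
      rw [show (n : Int) + ((pvScan arm n - n : Nat) : Int) = ((pvScan arm n : Nat) : Int) from
        by omega]
      simp only [Prod.mk.injEq]
      exact ⟨by decide, by first | trivial | omega, by first | trivial | omega⟩
    · -- the sequence is absent (find = -1) but the arm has no gap before its last
      -- character, so A's offset fixpoint is 0 and both return ('', -1, tagLength - 2)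
      have hm1 : PySem.Chars.find (PySem.Chars.replace arm ['-'] []) seq.toList = -1 := by
        have := PySem.Chars.neg_one_le_find (PySem.Chars.replace arm ['-'] []) seq.toList
        omega
      have hfree : (arm.dropLast).count '-' = 0 := by
        rcases hdisj with h | h
        · exact absurd h h0
        · exact h
      have hoff1 : aOffsetLoop arm (-1) (arm.length + 1) 0 = 0 := by
        rw [aOffsetLoop]
        simp [PySem.Chars.slice_eq_listSlice, PySem.List.slice_to_neg_one, pv_count_single,
          hfree]
      simp only [hm1, hoff1]
      rw [if_neg (by omega : ¬ (1 : Int) ≤ -1), if_pos htle, hg0]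
      simp only [Prod.mk.injEq]
      exact ⟨by decide, by first | trivial | omega, by first | trivial | omega⟩
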